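-- pv_equiv track=rewrite | github.com/amc8391/advent-of-code | 2015/day3/solution.py | get_houses_visited_multiple_sleighs
-- ===== SOURCE A (Python) =====
-- UP_DIRECTION = '^'
--
-- DOWN_DIRECTION = 'v'
--
-- LEFT_DIRECTION = '<'
--
-- RIGHT_DIRECTION = '>'
--
-- def get_visited_houses(directions):
--     current_coordinate = (0, 0)
--     visited_coordinates = {
--         current_coordinate: 1
--     }
--
--     for direction in directions:
--         if RIGHT_DIRECTION == direction:
--             current_coordinate = (current_coordinate[0] + 1, current_coordinate[1])
--         if LEFT_DIRECTION == direction: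
--             current_coordinate = (current_coordinate[0] - 1, current_coordinate[1])
--         if UP_DIRECTION == direction:
--             current_coordinate = (current_coordinate[0], current_coordinate[1] + 1)
--         if DOWN_DIRECTION == direction:
--             current_coordinate = (current_coordinate[0], current_coordinate[1] - 1)
--
--         if current_coordinate in visited_coordinates:
--             visited_coordinates[current_coordinate] += 1
--         else:
--             visited_coordinates[current_coordinate] = 1
--
--     return visited_coordinates
--
-- def get_houses_visited_multiple_sleighs(directions, santa_instances):
--     santa_x_directions = []
--     santa_x_visited_houses = []
--     for idx in range(0, santa_instances):
--         santa_x_directions.append('')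
--         santa_x_visited_houses = {}
--
--     for idx in range(0, len(directions)):
--         santa_x_directions[idx % santa_instances] += directions[idx]
--
--     for idx in range(0, santa_instances):
--         santa_x_directions.append(0)
--         santa_x_visited_houses[idx] = get_visited_houses(santa_x_directions[idx])
--         santa_x_visited_houses[0].update(santa_x_visited_houses[idx])
--     return santa_x_visited_houses[0]
-- ===== SOURCE B (Python) =====
-- def get_houses_visited_multiple_sleighs(directions, santa_instances):
--     # One pass: route move i to santa i % santa_instances, each santa carrying
--     # its own (position, visit-count dict) state; merge the dicts at the end.
--     states = [((0, 0), {(0, 0): 1}) for _ in range(santa_instances)]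
--     for i, ch in enumerate(directions):
--         j = i % santa_instances
--         (x, y), counts = states[j]
--         if ch == '>':
--             x += 1
--         elif ch == '<':
--             x -= 1
--         elif ch == '^':
--             y += 1
--         elif ch == 'v':
--             y -= 1
--         counts[(x, y)] = counts.get((x, y), 0) + 1
--         states[j] = ((x, y), counts)
--     merged = states[0][1]
--     for _, counts in states[1:]:
--         merged.update(counts)
--     return merged
-- ===== Notes on version B (the rewrite author's own statement) =====
-- stated objective: alternative
-- what changed: B replaces A's three-phase scheme (build one direction string per santa by repeated concatenation, then replay each string separately, then merge through an index-keyed dict) with a single pass over the directions that routes each move directly to santa i % k, keeping per-santa (position, count-dict) states, followed by a plain last-wins dict merge.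
import Mathlib
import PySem

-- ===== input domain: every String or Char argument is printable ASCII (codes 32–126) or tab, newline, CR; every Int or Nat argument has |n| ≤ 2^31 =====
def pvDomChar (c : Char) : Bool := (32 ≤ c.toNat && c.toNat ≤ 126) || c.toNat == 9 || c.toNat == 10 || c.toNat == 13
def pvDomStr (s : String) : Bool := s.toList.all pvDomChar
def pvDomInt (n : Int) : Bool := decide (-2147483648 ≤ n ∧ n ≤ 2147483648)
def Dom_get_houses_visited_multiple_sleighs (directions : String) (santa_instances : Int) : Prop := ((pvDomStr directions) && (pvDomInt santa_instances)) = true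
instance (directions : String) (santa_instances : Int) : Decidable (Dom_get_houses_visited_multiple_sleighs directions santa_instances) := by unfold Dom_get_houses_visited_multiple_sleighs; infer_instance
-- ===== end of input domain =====

-- B replaces A's three-phase scheme (per-santa string building, replay, index-keyed merge) with a
-- single pass routing each move to santa i % k plus a plain last-wins merge; return value only.


-- ===== PORT A =====
def pvStepA (st : (Int × Int) × PySem.Dict (Int × Int) Int) (c : Char) :
    (Int × Int) × PySem.Dict (Int × Int) Int :=
  let cur := st.1
  let cur := if '>' = c then (cur.1 + 1, cur.2) else cur
  let cur := if '<' = c then (cur.1 - 1, cur.2) else cur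
  let cur := if '^' = c then (cur.1, cur.2 + 1) else cur
  let cur := if 'v' = c then (cur.1, cur.2 - 1) else cur
  let vis := st.2
  -- `visited[c] += 1` on a present key reads the stored value: getD with any default
  let vis := if vis.contains cur then vis.insert cur (vis.getD cur 0 + 1) else vis.insert cur 1
  (cur, vis)

def pvGetVisitedHouses (directions : List Char) : PySem.Dict (Int × Int) Int :=
  (directions.foldl pvStepA ((0, 0), PySem.Dict.empty.insert (0, 0) 1)).2

def get_houses_visited_multiple_sleighs (directions : String) (santa_instances : Int) : List (Int × Int × Int) :=
  -- first loop: appends '' k times (the repeated `santa_x_visited_houses = {}` is dead: overwritten below)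
  let strs : List (List Char) := (PySem.List.pyRange 0 santa_instances).foldl (fun s _ => s ++ [[]]) []
  let ds := directions.toList
  -- second loop: `santa_x_directions[idx % k] += directions[idx]`; idx % k ≥ 0 for k ≥ 1 (Pre_), so .toNat is exact
  let strs := (PySem.List.pyRange 0 (PySem.List.len ds)).foldl
    (fun s idx =>
      s.set (PySem.Int.mod idx santa_instances).toNat
        ((s.getD (PySem.Int.mod idx santa_instances).toNat []) ++ [PySem.List.pyGetD ds idx ' '])) strs
  -- third loop: `santa_x_directions.append(0)` appends past every index ever read, hence dropped;
  -- visited dicts keyed by idx, dict at key 0 updated in place each round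
  let d : PySem.Dict Int (PySem.Dict (Int × Int) Int) :=
    (PySem.List.pyRange 0 santa_instances).foldl
      (fun d idx =>
        ((d.insert idx (pvGetVisitedHouses (PySem.List.pyGetD strs idx []))).insert 0
          (PySem.Dict.update
            ((d.insert idx (pvGetVisitedHouses (PySem.List.pyGetD strs idx []))).getD 0 PySem.Dict.empty)
            (pvGetVisitedHouses (PySem.List.pyGetD strs idx [])).items))) PySem.Dict.empty
  (d.getD 0 PySem.Dict.empty).items.map (fun p => (p.1.1, p.1.2, p.2))

-- ===== PORT B =====
def pvInitSanta : (Int × Int) × PySem.Dict (Int × Int) Int :=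
  ((0, 0), PySem.Dict.empty.insert (0, 0) 1)

def pvSantaStep (st : (Int × Int) × PySem.Dict (Int × Int) Int) (c : Char) :
    (Int × Int) × PySem.Dict (Int × Int) Int :=
  let p := st.1
  let p :=
    if c = '>' then (p.1 + 1, p.2)
    else if c = '<' then (p.1 - 1, p.2)
    else if c = '^' then (p.1, p.2 + 1)
    else if c = 'v' then (p.1, p.2 - 1)
    else p
  (p, st.2.insert p (st.2.getD p 0 + 1))

def get_houses_visited_multiple_sleighs_alt (directions : String) (santa_instances : Int) : List (Int × Int × Int) :=
  let states := List.replicate santa_instances.toNat pvInitSanta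
  -- for i, ch in enumerate(directions): j = i % santa_instances (≥ 0 for k ≥ 1, so .toNat is exact;
  -- the getD default is never read: j is always in range)
  let states := (PySem.List.enumerate directions.toList).foldl
    (fun sts p =>
      sts.set (PySem.Int.mod p.1 santa_instances).toNat
        (pvSantaStep (sts.getD (PySem.Int.mod p.1 santa_instances).toNat pvInitSanta) p.2)) states
  -- merged = states[0][1]; update with the dicts of states[1:]
  let merged := (states.drop 1).foldl (fun m st => PySem.Dict.update m st.2.items)
    (states.getD 0 pvInitSanta).2
  merged.items.map (fun p => (p.1.1, p.1.2, p.2))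

-- ===== PRECONDITION & SPEC =====
-- Pre_ excludes exactly santa_instances ≤ 0, on which A raises (ZeroDivisionError / IndexError).
def Pre_get_houses_visited_multiple_sleighs (directions : String) (santa_instances : Int) : Prop :=
  1 ≤ santa_instances
instance (directions : String) (santa_instances : Int) : Decidable (Pre_get_houses_visited_multiple_sleighs directions santa_instances) := by unfold Pre_get_houses_visited_multiple_sleighs; infer_instance

def pvWitness_get_houses_visited_multiple_sleighs : String × Int := ("^>v<>", 2)

def Spec_get_houses_visited_multiple_sleighs (directions : String) (santa_instances : Int) (out : List (Int × Int × Int)) : Prop := out = get_houses_visited_multiple_sleighs_alt directions santa_instances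
instance (directions : String) (santa_instances : Int) (out : List (Int × Int × Int)) : Decidable (Spec_get_houses_visited_multiple_sleighs directions santa_instances out) := by unfold Spec_get_houses_visited_multiple_sleighs; infer_instance

-- ===== CLAIM (what is proved, stated in full; the proofs are below) =====
def Claim_equal_get_houses_visited_multiple_sleighs : Prop := ∀ (directions : String) (santa_instances : Int), Dom_get_houses_visited_multiple_sleighs directions santa_instances → Pre_get_houses_visited_multiple_sleighs directions santa_instances → Spec_get_houses_visited_multiple_sleighs directions santa_instances (get_houses_visited_multiple_sleighs directions santa_instances)

-- ===== LEMMAS AND PROOFS =====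

-- A's per-move step equals B's per-move step.
theorem pvStepA_eq : pvStepA = pvSantaStep := by
  funext st c
  have hdict : ∀ (d : PySem.Dict (Int × Int) Int) (q : Int × Int),
      (if d.contains q then d.insert q (d.getD q 0 + 1) else d.insert q 1)
        = d.insert q (d.getD q 0 + 1) := by
    intro d q
    by_cases h : d.contains q
    · simp [h]
    · have := PySem.Dict.getD_of_not_contains d (k := q) 0 (by simpa using h)
      simp [h, this]
  unfold pvStepA pvSantaStep
  by_cases h1 : '>' = c
  · subst h1; simp [hdict]
  by_cases h2 : '<' = c
  · subst h2; simp [hdict]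
  by_cases h3 : '^' = c
  · subst h3; simp [hdict]
  by_cases h4 : 'v' = c
  · subst h4; simp [hdict]
  simp [h1, h2, h3, h4, Ne.symm h1, Ne.symm h2, Ne.symm h3, Ne.symm h4, hdict]

-- A's replay of one santa's string is B's per-santa fold.
theorem pvGetVisitedHouses_eq (cs : List Char) :
    pvGetVisitedHouses cs = (cs.foldl pvSantaStep pvInitSanta).2 := by
  unfold pvGetVisitedHouses pvInitSanta
  rw [pvStepA_eq]

-- A's first loop builds k empty strings.
theorem pv_append_empty (l : List Int) (s : List (List Char)) :
    l.foldl (fun s _ => s ++ [[]]) s = s ++ List.replicate l.length [] := by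
  induction l generalizing s with
  | nil => simp
  | cons a l ih => simp [List.foldl_cons, ih, List.replicate_succ]

-- the distributing fold preserves length
theorem pv_strfold_length (k : Int) (l : List (Int × Char)) (strs : List (List Char)) :
    (l.foldl (fun s p =>
      s.set (PySem.Int.mod p.1 k).toNat
        ((s.getD (PySem.Int.mod p.1 k).toNat []) ++ [p.2])) strs).length = strs.length := by
  induction l generalizing strs with
  | nil => rfl
  | cons a l ih => rw [List.foldl_cons, ih, List.length_set]

-- CORE: routing each move to component i % k = replaying each component's collected string.
theorem pv_interleave (k : Int) (l : List (Int × Char)) (strs : List (List Char)) :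
    l.foldl (fun sts p =>
        sts.set (PySem.Int.mod p.1 k).toNat
          (pvSantaStep (sts.getD (PySem.Int.mod p.1 k).toNat pvInitSanta) p.2))
      (strs.map (fun cs => cs.foldl pvSantaStep pvInitSanta))
    = (l.foldl (fun s p =>
        s.set (PySem.Int.mod p.1 k).toNat
          ((s.getD (PySem.Int.mod p.1 k).toNat []) ++ [p.2])) strs).map
        (fun cs => cs.foldl pvSantaStep pvInitSanta) := by
  induction l generalizing strs with
  | nil => rfl
  | cons a l ih =>
    rw [List.foldl_cons, List.foldl_cons, ← ih]
    congr 1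
    set j := (PySem.Int.mod a.1 k).toNat with hj
    by_cases hjl : j < strs.length
    · rw [List.map_set]
      congr 1
      rw [List.getD_eq_getElem _ _ hjl,
          List.getD_eq_getElem _ _ (by simpa using hjl), List.getElem_map,
          List.foldl_append]
      rfl
    · rw [Nat.not_lt] at hjl
      rw [List.set_eq_of_length_le (by simpa using hjl),
          List.set_eq_of_length_le hjl]

-- re-inserting a present binding changes nothing
theorem pv_insert_id (d : PySem.Dict (Int × Int) Int) (k : Int × Int) (v : Int)
    (hnd : d.keys.Nodup) (h : d.get? k = some v) : d.insert k v = d := by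
  apply PySem.Dict.ext
  have hc : d.contains k = true := by
    rw [PySem.Dict.contains_eq_isSome_get?, h]; rfl
  rw [PySem.Dict.items_insert_of_contains (h := hc)]
  conv_rhs => rw [← List.map_id d.items]
  apply List.map_congr_left
  intro p hp
  by_cases hk : p.1 == k
  · have hp' : (p.1, p.2) ∈ d.items := by simpa using hp
    have : d.get? p.1 = some p.2 := PySem.Dict.get?_of_mem_items _ hp' hnd
    have hpk : p.1 = k := by exact_mod_cast eq_of_beq hk
    rw [hpk, h] at this
    have hv : v = p.2 := Option.some_inj.mp this
    simp [← hpk, hv]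
  · simp [hk]

theorem pv_update_self (d : PySem.Dict (Int × Int) Int) (hnd : d.keys.Nodup) :
    PySem.Dict.update d d.items = d := by
  have : ∀ (l : List ((Int × Int) × Int)), (∀ p ∈ l, d.get? p.1 = some p.2) →
      PySem.Dict.update d l = d := by
    intro l
    induction l with
    | nil => intro _; rfl
    | cons p l ih =>
      intro hl
      have : PySem.Dict.update d (p :: l) = PySem.Dict.update (d.insert p.1 p.2) l := rfl
      rw [this, pv_insert_id d p.1 p.2 hnd (hl p (by simp))]
      exact ih (fun q hq => hl q (by simp [hq]))
  exact this d.items (fun p hp => PySem.Dict.get?_of_mem_items _ (by simpa using hp) hnd)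

theorem pv_gvh_nodup (cs : List Char) (st : (Int × Int) × PySem.Dict (Int × Int) Int)
    (h : st.2.keys.Nodup) : (cs.foldl pvSantaStep st).2.keys.Nodup := by
  induction cs generalizing st with
  | nil => exact h
  | cons c cs ih =>
    rw [List.foldl_cons]
    exact ih _ (by simpa [pvSantaStep] using PySem.Dict.nodup_keys_insert _ _ _ h)

-- A's index-keyed merge dict, read at key 0, is a fold of updates.
theorem pv_merge (F : List Char → PySem.Dict (Int × Int) Int) (l : List (Int × List Char))
    (D : PySem.Dict Int (PySem.Dict (Int × Int) Int)) (h0 : ∀ p ∈ l, p.1 ≠ 0) :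
    (l.foldl (fun d p =>
        ((d.insert p.1 (F p.2)).insert 0
          (PySem.Dict.update ((d.insert p.1 (F p.2)).getD 0 PySem.Dict.empty) (F p.2).items))) D).getD 0
        PySem.Dict.empty
    = l.foldl (fun m p => PySem.Dict.update m (F p.2).items) (D.getD 0 PySem.Dict.empty) := by
  induction l generalizing D with
  | nil => rfl
  | cons p l ih =>
    rw [List.foldl_cons, List.foldl_cons,
        ih _ (fun q hq => h0 q (by simp [hq])),
        PySem.Dict.getD_insert_self,
        PySem.Dict.getD_insert_of_ne (k := p.1) (k' := (0 : Int)) _ _ _ (Ne.symm (h0 p (by simp)))]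

-- ===== VERDICT (by name: the statement is the Claim_ definition above) =====
theorem get_houses_visited_multiple_sleighs_spec : Claim_equal_get_houses_visited_multiple_sleighs := by
  intro directions k hdom hpre
  unfold Spec_get_houses_visited_multiple_sleighs
  unfold Pre_get_houses_visited_multiple_sleighs at hpre
  obtain ⟨K, rfl⟩ : ∃ K : Nat, k = (K : Int) :=
    ⟨k.toNat, (Int.toNat_of_nonneg (by omega)).symm⟩
  have hK : 1 ≤ K := by exact_mod_cast hpre
  simp only [get_houses_visited_multiple_sleighs, get_houses_visited_multiple_sleighs_alt]
  set ds := directions.toList with hds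
  -- A's first loop builds K empty strings
  have hA1 : (PySem.List.pyRange 0 (K : Int)).foldl (fun s _ => s ++ [[]])
      ([] : List (List Char)) = List.replicate K [] := by
    rw [pv_append_empty]
    simp [PySem.List.pyRange_zero_natCast]
  -- A's second loop is the string-distributing fold over the enumeration
  have hA2 : (PySem.List.pyRange 0 (PySem.List.len ds)).foldl
      (fun s idx => s.set (PySem.Int.mod idx (K : Int)).toNat
        ((s.getD (PySem.Int.mod idx (K : Int)).toNat []) ++ [PySem.List.pyGetD ds idx ' ']))
      (List.replicate K [])
      = (PySem.List.enumerate ds).foldl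
        (fun s p => s.set (PySem.Int.mod p.1 (K : Int)).toNat
          ((s.getD (PySem.Int.mod p.1 (K : Int)).toNat []) ++ [p.2]))
        (List.replicate K []) := by
    rw [PySem.List.enumerate_eq_map_pyRange ds ' ', List.foldl_map]
  -- B's initial state vector is the image of K empty strings
  have hBinit : List.replicate ((K : Int)).toNat pvInitSanta
      = (List.replicate K ([] : List Char)).map (fun cs => cs.foldl pvSantaStep pvInitSanta) := by
    simp
  rw [hA1, hA2, hBinit, pv_interleave]
  set strsF := (PySem.List.enumerate ds).foldl
    (fun s p => s.set (PySem.Int.mod p.1 (K : Int)).toNat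
      ((s.getD (PySem.Int.mod p.1 (K : Int)).toNat []) ++ [p.2]))
    (List.replicate K []) with hstrsF
  have hlenF : strsF.length = K := by
    rw [hstrsF, pv_strfold_length, List.length_replicate]
  obtain ⟨cs0, rest, hcons⟩ : ∃ cs0 rest, strsF = cs0 :: rest := by
    cases h : strsF with
    | nil => rw [h] at hlenF; simp at hlenF; omega
    | cons a t => exact ⟨a, t, rfl⟩
  -- A's third loop is a fold over the enumeration of the string list
  have hlen3 : (K : Int) = PySem.List.len strsF := by
    simp [PySem.List.len, hlenF]
  have hA3 : (PySem.List.pyRange 0 (K : Int)).foldl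
      (fun d idx =>
        ((d.insert idx (pvGetVisitedHouses (PySem.List.pyGetD strsF idx []))).insert 0
          (PySem.Dict.update
            ((d.insert idx (pvGetVisitedHouses (PySem.List.pyGetD strsF idx []))).getD 0 PySem.Dict.empty)
            (pvGetVisitedHouses (PySem.List.pyGetD strsF idx [])).items))) PySem.Dict.empty
      = (PySem.List.enumerate strsF).foldl
        (fun d p =>
          ((d.insert p.1 (pvGetVisitedHouses p.2)).insert 0
            (PySem.Dict.update
              ((d.insert p.1 (pvGetVisitedHouses p.2)).getD 0 PySem.Dict.empty)
              (pvGetVisitedHouses p.2).items))) PySem.Dict.empty := by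
    rw [hlen3, PySem.List.enumerate_eq_map_pyRange strsF [], List.foldl_map]
  rw [hA3, hcons]
  -- peel the idx = 0 step of A's merge loop
  have hnd0 : (pvGetVisitedHouses cs0).keys.Nodup := by
    rw [pvGetVisitedHouses_eq]
    exact pv_gvh_nodup cs0 pvInitSanta
      (PySem.Dict.nodup_keys_insert _ _ _ PySem.Dict.nodup_keys_empty)
  rw [PySem.List.enumerate_cons, List.foldl_cons]
  rw [PySem.Dict.getD_insert_self, PySem.Dict.insert_insert_self,
      pv_update_self _ hnd0]
  rw [pv_merge (F := pvGetVisitedHouses) (l := PySem.List.enumerate rest (0 + 1))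
      (h0 := by
        intro p hp
        rw [PySem.List.mem_enumerate_iff] at hp
        obtain ⟨m, hm, rfl⟩ := hp
        omega)]
  rw [PySem.Dict.getD_insert_self]
  -- drop the index component of A's remaining merge loop
  have hA4 : (PySem.List.enumerate rest (0 + 1)).foldl
      (fun m p => PySem.Dict.update m (pvGetVisitedHouses p.2).items) (pvGetVisitedHouses cs0)
      = rest.foldl (fun m cs => PySem.Dict.update m (pvGetVisitedHouses cs).items)
        (pvGetVisitedHouses cs0) := by
    conv_rhs => rw [← PySem.List.map_snd_enumerate rest (0 + 1), List.foldl_map]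
  rw [hA4]
  -- B's side: head state and tail states of the mapped list
  simp only [List.map_cons, List.getD_cons_zero, List.drop_succ_cons, List.drop_zero,
    List.foldl_map]
  simp only [pvGetVisitedHouses_eq]
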